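-- pv_equiv track=rewrite | github.com/ggsv06/mc102 | LABORATÓRIOS/14/lab14.py | verifica_tarefas
-- ===== SOURCE A (Python) =====
-- def verifica_tarefas(dependencias, tarefa, visitadas):
--     dtemp = {}
--     for key in dependencias:
--         ltemp = []
--         for i in dependencias[key]:
--             for ii in dependencias[i]:
--                 ltemp.append(ii)
--         ltemp = list(dict.fromkeys(ltemp))
--         ltemp.sort()
--         dtemp[key] = ltemp
--     if dtemp in visitadas:
--         return False
--     visitadas.append(dependencias)
--     for key in dtemp:
--         for i in dtemp[key]:
--             if i != 0:
--                 return verifica_tarefas(dtemp, i, visitadas)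
--     return True
-- ===== SOURCE B (Python) =====
-- # B: the tail recursion rewritten as one while-True loop; dtemp built by a dict
-- # comprehension over sorted set-unions, the first nonzero second-level dependency
-- # found by next() over a generator. Same observable append to `visitadas` as A;
-- # same return value on inputs where A returns (Pre_ excludes KeyError inputs).
-- def verifica_tarefas(dependencias, tarefa, visitadas):
--     while True:
--         dtemp = {k: sorted({ii for i in dependencias[k] for ii in dependencias[i]})
--                  for k in dependencias}
--         if dtemp in visitadas:
--             return False
--         visitadas.append(dependencias)
--         nxt = next((i for row in dtemp.values() for i in row if i != 0), None)
--         if nxt is None: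
--             return True
--         dependencias = dtemp
-- ===== Notes on version B (the rewrite author's own statement) =====
-- stated objective: simpler
-- what changed: The tail recursion becomes a single while-True loop: the triple nested append loop plus dict.fromkeys-dedup plus in-place sort becomes a dict comprehension with sorted of a set comprehension, and the double scan for the first nonzero dependency becomes next() over a generator; Pre_ excludes inputs where some dependency value is not a key of the dict, on which Python A raises KeyError.
import Mathlib
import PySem

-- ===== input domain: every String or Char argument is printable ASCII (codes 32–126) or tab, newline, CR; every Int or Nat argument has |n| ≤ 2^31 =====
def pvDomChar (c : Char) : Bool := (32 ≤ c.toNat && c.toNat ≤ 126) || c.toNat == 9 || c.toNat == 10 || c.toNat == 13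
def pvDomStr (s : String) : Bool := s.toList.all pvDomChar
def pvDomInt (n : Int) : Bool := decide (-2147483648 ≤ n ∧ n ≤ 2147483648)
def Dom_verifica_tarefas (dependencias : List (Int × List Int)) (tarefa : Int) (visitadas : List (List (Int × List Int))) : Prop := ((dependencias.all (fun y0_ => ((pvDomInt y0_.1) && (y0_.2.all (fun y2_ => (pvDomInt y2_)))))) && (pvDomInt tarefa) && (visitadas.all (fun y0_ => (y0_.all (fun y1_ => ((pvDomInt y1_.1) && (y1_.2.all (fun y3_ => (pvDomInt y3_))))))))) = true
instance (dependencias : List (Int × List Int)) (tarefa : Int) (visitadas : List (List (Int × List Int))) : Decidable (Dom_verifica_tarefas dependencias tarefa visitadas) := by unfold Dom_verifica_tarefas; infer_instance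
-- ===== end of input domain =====

-- B rewrites A's tail recursion as one while-True loop (dict comprehension of sorted
-- set-unions, next() for the first nonzero entry); objective: simpler. Both A and B append
-- to the caller's `visitadas` in place (same mutation) — the equivalence proved is about
-- the return value.

-- ===== PORT A =====
-- ---- termination toolkit for port A (cited by its decreasing_by; must precede the def) ----
-- all values appearing in dependency lists
def pvElemsA (d : List (Int × List Int)) : List Int := d.flatMap (fun p => p.2)
-- the key list of the dict the association list encodes
def pvKeylistA (d : List (Int × List Int)) : List Int := PySem.List.dedup (d.map Prod.fst)
-- the strictly increasing list of all values in dependency lists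
def pvSortedEA (d : List (Int × List Int)) : List Int :=
  PySem.List.sorted (PySem.Set.ofList (pvElemsA d)) (fun x => x) false
-- all strictly sorted lists over pvElemsA d, as sublists of pvSortedEA d
def pvCandSA (d : List (Int × List Int)) : List (List Int) := (pvSortedEA d).sublists
-- all association lists with key list pvKeylistA d and values from pvCandSA d
def pvCandLA (d : List (Int × List Int)) : List (List (Int × List Int)) :=
  ((pvKeylistA d).map (fun k => (pvCandSA d).map (fun v => (k, v)))).sections
-- the well-founded measure for the recursion of port A
def pvMeasA (d : List (Int × List Int)) (visit : List (List (Int × List Int))) : Nat :=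
  2 * (((pvCandLA d).toFinset) \ visit.toFinset).card +
    (if d ∈ ((pvCandLA d).toFinset) \ visit.toFinset then 0 else 1)

theorem pv_mem_candSA (d : List (Int × List Int)) (l : List Int)
    (hl : l.Pairwise (· < ·)) (hsubE : ∀ x ∈ l, x ∈ pvElemsA d) : l ∈ pvCandSA d := by
  rw [pvCandSA, List.mem_sublists]
  refine List.sublist_of_subperm_of_pairwise (hl.nodup.subperm ?_) hl
    (PySem.List.sorted_ofList_pairwise_lt _)
  intro x hx
  rw [pvSortedEA, PySem.List.mem_sorted, PySem.Set.mem_ofList]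
  exact hsubE x hx

theorem pv_candS_monoA (d' d : List (Int × List Int)) (hE : ∀ x ∈ pvElemsA d', x ∈ pvElemsA d) :
    ∀ l ∈ pvCandSA d', l ∈ pvCandSA d := by
  intro l hl
  rw [pvCandSA, List.mem_sublists] at hl
  refine pv_mem_candSA d l (List.Pairwise.sublist hl (PySem.List.sorted_ofList_pairwise_lt _)) ?_
  intro x hx
  have : x ∈ pvSortedEA d' := hl.subset hx
  rw [pvSortedEA, PySem.List.mem_sorted, PySem.Set.mem_ofList] at this
  exact hE x this

theorem pv_mem_candL_selfA (d' : List (Int × List Int))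
    (hnd : (d'.map Prod.fst).Nodup)
    (hv : ∀ p ∈ d', p.2.Pairwise (· < ·)) : d' ∈ pvCandLA d' := by
  unfold pvCandLA pvKeylistA
  rw [PySem.List.dedup_eq_ofList, PySem.Set.ofList_eq_self_of_nodup _ hnd]
  rw [List.mem_sections, List.forall₂_map_right_iff, List.forall₂_map_right_iff,
    List.forall₂_same]
  intro p hp
  refine List.mem_map.2 ⟨p.2, ?_, Prod.mk.eta⟩
  refine pv_mem_candSA d' p.2 (hv p hp) ?_
  intro x hx
  exact List.mem_flatMap.2 ⟨p, hp, hx⟩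

theorem pv_candL_monoA (d' d : List (Int × List Int))
    (hk : pvKeylistA d' = pvKeylistA d) (hE : ∀ x ∈ pvElemsA d', x ∈ pvElemsA d) :
    ∀ l ∈ pvCandLA d', l ∈ pvCandLA d := by
  intro l hl
  unfold pvCandLA at hl ⊢
  rw [List.mem_sections, List.forall₂_map_right_iff] at hl ⊢
  rw [hk] at hl
  refine hl.imp (fun a k ha => ?_)
  rcases List.mem_map.1 ha with ⟨v, hv, rfl⟩
  exact List.mem_map.2 ⟨v, pv_candS_monoA d' d hE v hv, rfl⟩

theorem pv_meas_decrA (d d' : List (Int × List Int)) (visit : List (List (Int × List Int)))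
    (hk : pvKeylistA d' = pvKeylistA d) (hE : ∀ x ∈ pvElemsA d', x ∈ pvElemsA d)
    (hself : d' ∈ pvCandLA d') (hnv : d' ∉ visit) :
    pvMeasA d' (visit ++ [d]) < pvMeasA d visit := by
  have hAA : (pvCandLA d').toFinset ⊆ (pvCandLA d).toFinset := by
    intro x hx
    exact List.mem_toFinset.2 (pv_candL_monoA d' d hk hE x (List.mem_toFinset.1 hx))
  have hmemapp : ∀ x : List (Int × List Int),
      x ∈ (visit ++ [d]).toFinset ↔ (x ∈ visit ∨ x = d) := by
    intro x
    rw [List.mem_toFinset, List.mem_append, List.mem_singleton]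
  unfold pvMeasA
  by_cases hd : d ∈ ((pvCandLA d).toFinset) \ visit.toFinset
  · -- d is an unvisited candidate: the unvisited-candidate count strictly drops
    have hsub : (pvCandLA d').toFinset \ (visit ++ [d]).toFinset ⊆
        (((pvCandLA d).toFinset) \ visit.toFinset).erase d := by
      intro x hx
      rcases Finset.mem_sdiff.1 hx with ⟨hx1, hx2⟩
      rw [hmemapp, not_or] at hx2
      refine Finset.mem_erase.2 ⟨hx2.2, Finset.mem_sdiff.2 ⟨hAA hx1, ?_⟩⟩
      rw [List.mem_toFinset]
      exact hx2.1
    have h1 : ((pvCandLA d').toFinset \ (visit ++ [d]).toFinset).card ≤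
        (((pvCandLA d).toFinset) \ visit.toFinset).card - 1 := by
      calc _ ≤ ((((pvCandLA d).toFinset) \ visit.toFinset).erase d).card :=
            Finset.card_le_card hsub
        _ = _ := by rw [Finset.card_erase_of_mem hd]
    have h2 : 1 ≤ (((pvCandLA d).toFinset) \ visit.toFinset).card :=
      Finset.card_pos.2 ⟨d, hd⟩
    have h3 : (if d ∈ ((pvCandLA d).toFinset) \ visit.toFinset then 0 else 1) = 0 := by
      simp [hd]
    rw [h3]
    have h4 : (if d' ∈ ((pvCandLA d').toFinset) \ (visit ++ [d]).toFinset then 0 else 1) ≤ 1 := by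
      split <;> omega
    omega
  · -- d is not an unvisited candidate: the flag drops from 1 to 0
    have hsub : (pvCandLA d').toFinset \ (visit ++ [d]).toFinset ⊆
        ((pvCandLA d).toFinset) \ visit.toFinset := by
      intro x hx
      rcases Finset.mem_sdiff.1 hx with ⟨hx1, hx2⟩
      rw [hmemapp, not_or] at hx2
      refine Finset.mem_sdiff.2 ⟨hAA hx1, ?_⟩
      rw [List.mem_toFinset]
      exact hx2.1
    have h1 : ((pvCandLA d').toFinset \ (visit ++ [d]).toFinset).card ≤
        (((pvCandLA d).toFinset) \ visit.toFinset).card := Finset.card_le_card hsub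
    have hne : d' ≠ d := by
      intro he
      subst he
      refine hd (Finset.mem_sdiff.2 ⟨hAA (List.mem_toFinset.2 hself), ?_⟩)
      rw [List.mem_toFinset]
      exact hnv
    have h4 : (if d' ∈ ((pvCandLA d').toFinset) \ (visit ++ [d]).toFinset then 0 else 1) = 0 := by
      have hm : d' ∈ (pvCandLA d').toFinset \ (visit ++ [d]).toFinset := by
        refine Finset.mem_sdiff.2 ⟨List.mem_toFinset.2 hself, ?_⟩
        rw [hmemapp, not_or]
        exact ⟨hnv, hne⟩
      rw [if_pos hm]
    rw [h4]
    have h3 : (if d ∈ ((pvCandLA d).toFinset) \ visit.toFinset then 0 else 1) = 1 := by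
      simp [hd]
    omega

theorem pv_items_foldl_insertA (l : List Int) (g : Int → List Int) (d : PySem.Dict Int (List Int)) :
    ∀ p ∈ (l.foldl (fun dt k => dt.insert k (g k)) d).items,
      p ∈ d.items ∨ ∃ k, p = (k, g k) := by
  induction l generalizing d with
  | nil => intro p hp; exact Or.inl hp
  | cons x t ih =>
    intro p hp
    rcases ih _ p hp with h | h
    · rcases (PySem.Dict.mem_items_insert d x (g x) p).1 h with h1 | h1
      · exact Or.inr ⟨x, h1⟩
      · exact Or.inl h1.1
    · exact Or.inr h

theorem pv_mem_getD_mem_elemsA (dependencias : List (Int × List Int)) (i x : Int)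
    (hx : x ∈ (PySem.Dict.mk dependencias).getD i []) : x ∈ pvElemsA dependencias := by
  rw [PySem.Dict.getD_eq_get?_getD] at hx
  cases h : (PySem.Dict.mk dependencias).get? i with
  | none => rw [h] at hx; simp at hx
  | some v =>
    rw [h] at hx
    simp only [Option.getD_some] at hx
    have hm : (i, v) ∈ dependencias := PySem.Dict.mem_items_of_get?_eq_some _ h
    exact List.mem_flatMap.2 ⟨(i, v), hm, hx⟩

-- Python's `dtemp in visitadas` in A compares dicts by == (key set + per-key values, order blind)
def pyDictEqA (a b : List (Int × List Int)) : Bool :=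
  PySem.Set.equal (PySem.Set.ofList (a.map Prod.fst)) (PySem.Set.ofList (b.map Prod.fst)) &&
  (a.map Prod.fst).all (fun k => (PySem.Dict.mk a).get? k == (PySem.Dict.mk b).get? k)

theorem pyDictEq_reflA (a : List (Int × List Int)) : pyDictEqA a a = true := by
  unfold pyDictEqA
  rw [Bool.and_eq_true]
  constructor
  · rw [PySem.Set.equal_iff]; intro x; rfl
  · rw [List.all_eq_true]; intro k _; exact beq_self_eq_true _

-- body of A's `for key in dependencias` loop: nested append loops, dict.fromkeys dedup, sort
def buildAval (dep : PySem.Dict Int (List Int)) (key : Int) : List Int :=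
  let ltemp : List Int := (dep.getD key []).foldl
    (fun acc i => (dep.getD i []).foldl (fun a ii => a ++ [ii]) acc) []
  let ltemp := PySem.List.dedup ltemp
  PySem.List.sorted ltemp (fun x => x) false

-- A's first loop: dtemp built key by key
def buildA (dependencias : List (Int × List Int)) : PySem.Dict Int (List Int) :=
  (PySem.Dict.mk dependencias).keys.foldl
    (fun dtemp key => dtemp.insert key (buildAval (PySem.Dict.mk dependencias) key))
    PySem.Dict.empty

-- A's inner `for i in dtemp[key]: if i != 0: return …` scan
def firstInnerA (v : List Int) : Option Int :=
  match v with
  | [] => none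
  | i :: t => if i ≠ 0 then some i else firstInnerA t

-- A's double loop over dtemp (built dicts have unique keys, so iterating items is the dict loop)
def firstA (l : List (Int × List Int)) : Option Int :=
  match l with
  | [] => none
  | p :: rest =>
    match firstInnerA p.2 with
    | some i => some i
    | none => firstA rest

theorem buildAval_eq (dep : PySem.Dict Int (List Int)) (key : Int) :
    buildAval dep key = PySem.List.sorted
      (PySem.Set.ofList ((dep.getD key []).flatMap (fun i => dep.getD i []))) (fun x => x) false := by
  unfold buildAval
  simp only [PySem.List.foldl_append_singleton, PySem.List.foldl_append_eq_flatMap,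
    List.nil_append, PySem.List.dedup_eq_ofList]

theorem pv_decrA (dependencias : List (Int × List Int)) (visitadas : List (List (Int × List Int)))
    (h : ¬ (visitadas.any (fun v => pyDictEqA (buildA dependencias).items v)) = true) :
    pvMeasA (buildA dependencias).items (visitadas ++ [dependencias]) < pvMeasA dependencias visitadas := by
  have hkeys : (buildA dependencias).keys = pvKeylistA dependencias := by
    unfold buildA pvKeylistA
    rw [PySem.Dict.keys_foldl_insert, PySem.List.dedup_eq_ofList, PySem.Dict.keys_empty,
      PySem.Set.update_nil_left]
    rfl
  have hnodup : (buildA dependencias).keys.Nodup := by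
    unfold buildA
    apply PySem.Dict.nodup_keys_foldl_insert
    simp [PySem.Dict.keys, PySem.Dict.empty]
  have hitems : ∀ p ∈ (buildA dependencias).items,
      ∃ k, p = (k, buildAval (PySem.Dict.mk dependencias) k) := by
    intro p hp
    rcases pv_items_foldl_insertA _ _ _ p hp with h1 | h1
    · simp [PySem.Dict.empty] at h1
    · exact h1
  have hmapfst : (buildA dependencias).items.map Prod.fst = (buildA dependencias).keys := rfl
  have hpair : ∀ p ∈ (buildA dependencias).items, p.2.Pairwise (· < ·) := by
    intro p hp
    rcases hitems p hp with ⟨k, rfl⟩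
    rw [buildAval_eq]
    exact PySem.List.sorted_ofList_pairwise_lt _
  apply pv_meas_decrA
  · -- key lists agree
    unfold pvKeylistA
    rw [hmapfst, PySem.List.dedup_eq_ofList, PySem.Set.ofList_eq_self_of_nodup _ hnodup, hkeys]
    rfl
  · -- elements only shrink
    intro x hx
    rcases List.mem_flatMap.1 hx with ⟨p, hp, hxp⟩
    rcases hitems p hp with ⟨k, rfl⟩
    rw [buildAval_eq, PySem.List.mem_sorted, PySem.Set.mem_ofList] at hxp
    rcases List.mem_flatMap.1 hxp with ⟨i, _, hxi⟩
    exact pv_mem_getD_mem_elemsA dependencias i x hxi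
  · exact pv_mem_candL_selfA _ (hmapfst ▸ hnodup) hpair
  · intro hmem
    rw [List.any_eq_true] at h
    exact h ⟨(buildA dependencias).items, hmem, pyDictEq_reflA _⟩

-- A, transliterated: build dtemp, membership test against visitadas, append, recurse on the
-- first nonzero second-level dependency (the unused parameter `tarefa` is kept)
def verifica_tarefas (dependencias : List (Int × List Int)) (tarefa : Int) (visitadas : List (List (Int × List Int))) : Bool :=
  if h : (visitadas.any (fun v => pyDictEqA (buildA dependencias).items v)) = true then false
  else
    match firstA (buildA dependencias).items with
    | some i => verifica_tarefas (buildA dependencias).items i (visitadas ++ [dependencias])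
    | none => true
termination_by pvMeasA dependencias visitadas
decreasing_by exact pv_decrA dependencias visitadas h

-- ===== PORT B =====
-- Python's `dtemp in visitadas` in B (same == rule on dicts)
def pyDictEqB (a b : List (Int × List Int)) : Bool :=
  PySem.Set.equal (PySem.Set.ofList (a.map Prod.fst)) (PySem.Set.ofList (b.map Prod.fst)) &&
  (a.map Prod.fst).all (fun k => (PySem.Dict.mk a).get? k == (PySem.Dict.mk b).get? k)

-- B's per-key value: sorted({ii for i in dependencias[k] for ii in dependencias[i]})
def buildBval (dep : PySem.Dict Int (List Int)) (k : Int) : List Int :=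
  PySem.List.sorted (PySem.Set.ofList ((dep.getD k []).flatMap (fun i => dep.getD i [])))
    (fun x => x) false

-- B's dict comprehension `{k: … for k in dependencias}`
def buildB (dependencias : List (Int × List Int)) : PySem.Dict Int (List Int) :=
  PySem.Dict.ofList ((PySem.Dict.mk dependencias).keys.map
    (fun k => (k, buildBval (PySem.Dict.mk dependencias) k)))

-- B's while-True loop over its state (dependencias, visitadas), made structural by a fuel
-- counter; `next((i for row in dtemp.values() for i in row if i != 0), None)` is find? over
-- the flattened values. The lemmas below the claim prove the fuel is never exhausted.
def loopB (fuel : Nat) (dependencias : List (Int × List Int)) (visitadas : List (List (Int × List Int))) : Bool :=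
  match fuel with
  | 0 => false
  | fuel + 1 =>
    if visitadas.any (fun v => pyDictEqB (buildB dependencias).items v) then false
    else
      match ((buildB dependencias).values.flatten).find? (fun i => decide (i ≠ 0)) with
      | none => true
      | some _ => loopB fuel (buildB dependencias).items (visitadas ++ [dependencias])

-- fuel: one more than a bound on the rounds (distinct-values count × distinct-keys count
-- bounds the possible squared dicts; each continuing round appends a fresh one)
def verifica_tarefas_alt (dependencias : List (Int × List Int)) (tarefa : Int) (visitadas : List (List (Int × List Int))) : Bool :=
  loopB (2 * 2 ^ ((PySem.Set.ofList (dependencias.flatMap Prod.snd)).length *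
      (PySem.Set.ofList (dependencias.map Prod.fst)).length) + 2) dependencias visitadas

-- ===== PRECONDITION & SPEC =====
-- Pre_ excludes exactly the inputs on which Python A raises KeyError: some value in a
-- dependency list is not a key of the dict.
def Pre_verifica_tarefas (dependencias : List (Int × List Int)) (tarefa : Int) (visitadas : List (List (Int × List Int))) : Prop :=
  ∀ p ∈ dependencias, ∀ v ∈ p.2, v ∈ dependencias.map Prod.fst
instance (dependencias : List (Int × List Int)) (tarefa : Int) (visitadas : List (List (Int × List Int))) : Decidable (Pre_verifica_tarefas dependencias tarefa visitadas) := by unfold Pre_verifica_tarefas; infer_instance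

def pvWitness_verifica_tarefas : (List (Int × List Int)) × Int × (List (List (Int × List Int))) :=
  ([(1, [2]), (2, [])], 1, [])

def Spec_verifica_tarefas (dependencias : List (Int × List Int)) (tarefa : Int) (visitadas : List (List (Int × List Int))) (out : Bool) : Prop := out = verifica_tarefas_alt dependencias tarefa visitadas
instance (dependencias : List (Int × List Int)) (tarefa : Int) (visitadas : List (List (Int × List Int))) (out : Bool) : Decidable (Spec_verifica_tarefas dependencias tarefa visitadas out) := by unfold Spec_verifica_tarefas; infer_instance

-- ===== CLAIM (what is proved, stated in full; the proofs are below) =====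
def Claim_equal_verifica_tarefas : Prop := ∀ (dependencias : List (Int × List Int)) (tarefa : Int) (visitadas : List (List (Int × List Int))), Dom_verifica_tarefas dependencias tarefa visitadas → Pre_verifica_tarefas dependencias tarefa visitadas → Spec_verifica_tarefas dependencias tarefa visitadas (verifica_tarefas dependencias tarefa visitadas)

-- ===== LEMMAS AND PROOFS =====
theorem pyDictEqB_eq_pyDictEqA (a b : List (Int × List Int)) : pyDictEqB a b = pyDictEqA a b := rfl

theorem buildB_eq_buildA (dependencias : List (Int × List Int)) :
    buildB dependencias = buildA dependencias := by
  unfold buildB PySem.Dict.ofList PySem.Dict.update buildA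
  rw [List.foldl_map]
  congr 1
  funext dt k
  rw [buildAval_eq]
  rfl

theorem firstInnerA_eq (v : List Int) : firstInnerA v = v.find? (fun i => decide (i ≠ 0)) := by
  induction v with
  | nil => rfl
  | cons i t ih =>
    unfold firstInnerA
    rw [List.find?_cons]
    by_cases h : i ≠ 0 <;> simp [h, ih]

theorem firstA_eq (l : List (Int × List Int)) :
    firstA l = ((l.map (fun p => p.2)).flatten).find? (fun i => decide (i ≠ 0)) := by
  induction l with
  | nil => rfl
  | cons p rest ih =>
    unfold firstA
    rw [List.map_cons, List.flatten_cons, List.find?_append, firstInnerA_eq, ih]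
    cases p.2.find? (fun i => decide (i ≠ 0)) <;> simp

-- with enough fuel, B's loop computes A's recursion
theorem loopB_eq (dependencias : List (Int × List Int)) (tarefa : Int)
    (visitadas : List (List (Int × List Int))) :
    ∀ fuel : Nat, pvMeasA dependencias visitadas < fuel →
      loopB fuel dependencias visitadas = verifica_tarefas dependencias tarefa visitadas := by
  fun_induction verifica_tarefas dependencias tarefa visitadas with
  | case1 dep t vis h =>
    intro fuel hf
    match fuel with
    | f + 1 =>
      rw [loopB]
      simp only [buildB_eq_buildA, pyDictEqB_eq_pyDictEqA]
      rw [if_pos h]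
  | case2 dep t vis h i heq ih =>
    intro fuel hf
    match fuel with
    | f + 1 =>
      have hfind : ((buildA dep).values.flatten).find? (fun i => decide (i ≠ 0)) = some i := by
        simp only [PySem.Dict.values]
        rw [← firstA_eq]
        exact heq
      rw [loopB]
      simp only [buildB_eq_buildA, pyDictEqB_eq_pyDictEqA]
      rw [if_neg (by simpa using h), hfind]
      exact ih f (by have := pv_decrA dep vis h; omega)
  | case3 dep t vis h heq =>
    intro fuel hf
    match fuel with
    | f + 1 =>
      have hfind : ((buildA dep).values.flatten).find? (fun i => decide (i ≠ 0)) = none := by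
        simp only [PySem.Dict.values]
        rw [← firstA_eq]
        exact heq
      rw [loopB]
      simp only [buildB_eq_buildA, pyDictEqB_eq_pyDictEqA]
      rw [if_neg (by simpa using h), hfind]

theorem pv_sections_length {α : Type} (L : List (List α)) :
    L.sections.length = (L.map List.length).prod := by
  induction L with
  | nil => rfl
  | cons l L ih =>
    simp [List.sections, List.length_flatMap, ih, List.map_const',
      List.sum_replicate, Nat.mul_comm]

-- the fuel B uses strictly dominates the measure of A's recursion
theorem pv_fuel_enough (dependencias : List (Int × List Int)) (visitadas : List (List (Int × List Int))) :
    pvMeasA dependencias visitadas <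
      2 * 2 ^ ((PySem.Set.ofList (dependencias.flatMap Prod.snd)).length *
        (PySem.Set.ofList (dependencias.map Prod.fst)).length) + 2 := by
  have hcard : (((pvCandLA dependencias).toFinset) \ visitadas.toFinset).card ≤
      (pvCandLA dependencias).length := by
    calc _ ≤ (pvCandLA dependencias).toFinset.card := Finset.card_le_card Finset.sdiff_subset
      _ ≤ _ := List.toFinset_card_le _
  have hlen : (pvCandLA dependencias).length =
      2 ^ ((PySem.Set.ofList (dependencias.flatMap Prod.snd)).length *
        (PySem.Set.ofList (dependencias.map Prod.fst)).length) := by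
    unfold pvCandLA
    rw [pv_sections_length, List.map_map]
    simp only [Function.comp_def, List.length_map]
    rw [List.map_const', List.prod_replicate]
    unfold pvCandSA pvSortedEA pvKeylistA pvElemsA
    rw [List.length_sublists, PySem.List.length_sorted, ← pow_mul, PySem.List.dedup_eq_ofList]
  unfold pvMeasA
  have : (if dependencias ∈ ((pvCandLA dependencias).toFinset) \ visitadas.toFinset then 0 else 1) ≤ 1 := by
    split <;> omega
  omega

-- ===== VERDICT (by name: the statement is the Claim_ definition above) =====
theorem verifica_tarefas_spec : Claim_equal_verifica_tarefas := by
  intro dependencias tarefa visitadas _ _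
  unfold Spec_verifica_tarefas verifica_tarefas_alt
  rw [loopB_eq dependencias tarefa visitadas _ (pv_fuel_enough dependencias visitadas)]
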